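-- pv_equiv track=rewrite | github.com/scriptkiddy079/Analytics | georaster_canopy/job2.py | makeTupleList
-- ===== SOURCE A (Python) =====
-- def makeTupleList(min_id, max_id, num_cores):
--     step = (max_id - min_id) // num_cores
--     id_range = []
--     start = min_id
--     end = min_id + step
--     for x in range(num_cores):
--         if x != num_cores - 1:
--             id_range.append([start, end])
--             start = end
--             end += step
--         else:
--             id_range.append([start, max_id + 1])
--     return id_range
-- ===== SOURCE B (Python) =====
-- def makeTupleList(min_id, max_id, num_cores):
--     step = (max_id - min_id) // num_cores
--     out = []
--     hi = max_id + 1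
--     k = num_cores
--     while k > 0:
--         lo = min_id + (k - 1) * step
--         out.append([lo, hi])
--         hi = lo
--         k -= 1
--     out.reverse()
--     return out
-- ===== Notes on version B (the rewrite author's own statement) =====
-- stated objective: alternative
-- what changed: B builds the bucket list back-to-front: it walks k from num_cores down to 1, computes each lower bound directly as min_id + (k-1)*step, reuses it as the previous bucket's upper bound, and reverses at the end, instead of A's forward loop with a running start/end accumulator and a special-cased last iteration.
import Mathlib
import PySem

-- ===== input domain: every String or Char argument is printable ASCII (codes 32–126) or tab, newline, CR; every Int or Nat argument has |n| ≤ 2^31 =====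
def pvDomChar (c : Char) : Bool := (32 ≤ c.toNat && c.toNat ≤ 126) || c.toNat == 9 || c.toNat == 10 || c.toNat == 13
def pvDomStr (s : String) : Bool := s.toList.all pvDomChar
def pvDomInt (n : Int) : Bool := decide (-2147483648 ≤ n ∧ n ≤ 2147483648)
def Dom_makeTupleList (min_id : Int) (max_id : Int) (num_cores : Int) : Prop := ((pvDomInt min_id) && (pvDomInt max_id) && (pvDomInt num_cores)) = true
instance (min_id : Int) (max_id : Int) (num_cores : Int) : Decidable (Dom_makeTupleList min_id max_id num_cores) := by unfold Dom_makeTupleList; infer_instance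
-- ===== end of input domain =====

-- B replaces A's forward accumulator loop by a back-to-front countdown loop computing each lower bound directly ("alternative", same cost).

-- ===== PORT A =====
def makeTupleList (min_id : Int) (max_id : Int) (num_cores : Int) : List (List Int) :=
  let step := PySem.Int.floordiv (max_id - min_id) num_cores
  let st := (PySem.List.pyRange 0 num_cores 1).foldl
    (fun (st : List (List Int) × Int × Int) x =>
      if x ≠ num_cores - 1 then
        (st.1 ++ [[st.2.1, st.2.2]], st.2.2, st.2.2 + step)
      else
        (st.1 ++ [[st.2.1, max_id + 1]], st.2.1, st.2.2))
    ([], min_id, min_id + step)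
  st.1

-- ===== PORT B =====
-- B's while loop: k counts down, each bucket [min_id+(k-1)*step, hi] is appended, lo becomes the next hi.
def mtlLoop (min_id : Int) (step : Int) (k : Int) (hi : Int) (out : List (List Int)) : List (List Int) :=
  if k > 0 then
    mtlLoop min_id step (k - 1) (min_id + (k - 1) * step)
      (out ++ [[min_id + (k - 1) * step, hi]])
  else out
termination_by k.toNat
decreasing_by omega

def makeTupleList_alt (min_id : Int) (max_id : Int) (num_cores : Int) : List (List Int) :=
  let step := PySem.Int.floordiv (max_id - min_id) num_cores
  (mtlLoop min_id step num_cores (max_id + 1) []).reverse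

-- ===== PRECONDITION & SPEC =====
-- Pre_ excludes only num_cores = 0, on which A (and B) raises ZeroDivisionError.
def Pre_makeTupleList (min_id : Int) (max_id : Int) (num_cores : Int) : Prop := num_cores ≠ 0
instance (min_id : Int) (max_id : Int) (num_cores : Int) : Decidable (Pre_makeTupleList min_id max_id num_cores) := by unfold Pre_makeTupleList; infer_instance
def pvWitness_makeTupleList : Int × Int × Int := (1, 10, 3)

def Spec_makeTupleList (min_id : Int) (max_id : Int) (num_cores : Int) (out : List (List Int)) : Prop := out = makeTupleList_alt min_id max_id num_cores
instance (min_id : Int) (max_id : Int) (num_cores : Int) (out : List (List Int)) : Decidable (Spec_makeTupleList min_id max_id num_cores out) := by unfold Spec_makeTupleList; infer_instance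

-- ===== CLAIM (what is proved, stated in full; the proofs are below) =====
def Claim_equal_makeTupleList : Prop := ∀ (min_id : Int) (max_id : Int) (num_cores : Int), Dom_makeTupleList min_id max_id num_cores → Pre_makeTupleList min_id max_id num_cores → Spec_makeTupleList min_id max_id num_cores (makeTupleList min_id max_id num_cores)

-- ===== LEMMAS AND PROOFS =====

-- A's fold over the first m iterations (all with x ≠ nc - 1): running accumulator = adjacent-pair map.
theorem mtl_foldA (mn M step nc : Int) (m : Nat) (hm : (m : Int) ≤ nc - 1) :
    (PySem.List.pyRange 0 (m : Int) 1).foldl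
      (fun (st : List (List Int) × Int × Int) x =>
        if x ≠ nc - 1 then (st.1 ++ [[st.2.1, st.2.2]], st.2.2, st.2.2 + step)
        else (st.1 ++ [[st.2.1, M]], st.2.1, st.2.2))
      ([], mn, mn + step)
    = ((PySem.List.pyRange 0 (m : Int) 1).map
        (fun i => [mn + i * step, mn + (i + 1) * step]),
       mn + (m : Int) * step, mn + ((m : Int) + 1) * step) := by
  induction m with
  | zero =>
      simp
  | succ k ih =>
      have hk : ((k : Int)) ≤ nc - 1 := by push_cast at hm ⊢; omega
      have hsplit : PySem.List.pyRange 0 ((k : Int) + 1) 1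
          = PySem.List.pyRange 0 (k : Int) 1 ++ [(k : Int)] :=
        PySem.List.pyRange_one_succ_right (by positivity)
      have hne : ((k : Int)) ≠ nc - 1 := by omega
      push_cast
      rw [hsplit, List.foldl_append, ih hk, List.map_append]
      simp [hne]
      ring_nf

-- B's countdown loop unrolled: it deposits the buckets in reverse order after the accumulator.
theorem mtl_build (mn step hi : Int) (n : Nat) (out : List (List Int)) :
    mtlLoop mn step ((n : Int) + 1) hi out
    = out ++ ((PySem.List.pyRange 0 (n : Int) 1).map
        (fun i => [mn + i * step, mn + (i + 1) * step])
      ++ [[mn + (n : Int) * step, hi]]).reverse := by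
  induction n generalizing hi out with
  | zero =>
      rw [mtlLoop, if_pos (by omega), mtlLoop, if_neg (by omega)]
      simp
  | succ k ih =>
      rw [mtlLoop, if_pos (by push_cast; omega)]
      have he : ((k : Int) + 1 + 1) - 1 = (k : Int) + 1 := by ring
      push_cast
      rw [he, ih]
      have hsplit : PySem.List.pyRange 0 ((k : Int) + 1) 1
          = PySem.List.pyRange 0 (k : Int) 1 ++ [(k : Int)] :=
        PySem.List.pyRange_one_succ_right (by positivity)
      rw [hsplit, List.map_append]
      simp

theorem makeTupleList_spec : Claim_equal_makeTupleList := by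
  intro mn mx nc _ hpre
  unfold Spec_makeTupleList
  dsimp only [makeTupleList, makeTupleList_alt]
  by_cases hneg : nc < 0
  · have hempty : PySem.List.pyRange 0 nc 1 = [] := by
      rw [PySem.List.pyRange_one]
      simp
      omega
    rw [mtlLoop, if_neg (by omega)]
    simp [hempty]
  · have hpos : 0 < nc := by unfold Pre_makeTupleList at hpre; omega
    obtain ⟨n, hn⟩ : ∃ n : Nat, nc = ((n : Int) + 1) :=
      ⟨(nc - 1).toNat, by omega⟩
    subst hn
    have hsplit : PySem.List.pyRange 0 ((n : Int) + 1) 1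
        = PySem.List.pyRange 0 (n : Int) 1 ++ [(n : Int)] :=
      PySem.List.pyRange_one_succ_right (by positivity)
    set step := PySem.Int.floordiv (mx - mn) ((n : Int) + 1) with hstep
    have hm : ((n : Int)) ≤ ((n : Int) + 1) - 1 := by omega
    rw [hsplit, List.foldl_append,
        mtl_foldA mn (mx + 1) step ((n : Int) + 1) n hm,
        mtl_build mn step (mx + 1) n []]
    simp only [List.foldl_cons, List.foldl_nil]
    rw [if_neg (by simp)]
    simp
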